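-- pv_equiv track=rewrite | github.com/altg0x0/info_tasks | 15/d1.py | r_search
-- ===== SOURCE A (Python) =====
-- def r_search(arr, k):
--     la = 0
--     r = len(arr)
--     while r - la > 1:
--         d = (la + r) // 2
--         t = arr[d]
--         if t > k:
--             r = d
--         else:
--             la = d
--     return arr[la]
-- ===== SOURCE B (Python) =====
-- def r_search(arr, k):
--     if len(arr) <= 1:
--         return arr[0]
--     if arr[len(arr) // 2] > k:
--         return r_search(arr[:len(arr) // 2], k)
--     return r_search(arr[len(arr) // 2:], k)
-- ===== Notes on version B (the rewrite author's own statement) =====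
-- stated objective: alternative
-- what changed: Replaces the in-place while loop over (la, r) index bounds with a divide-and-conquer recursion on list slices: probe the middle of the current sublist and recurse into the half slice arr[:m] or arr[m:].
import Mathlib
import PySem

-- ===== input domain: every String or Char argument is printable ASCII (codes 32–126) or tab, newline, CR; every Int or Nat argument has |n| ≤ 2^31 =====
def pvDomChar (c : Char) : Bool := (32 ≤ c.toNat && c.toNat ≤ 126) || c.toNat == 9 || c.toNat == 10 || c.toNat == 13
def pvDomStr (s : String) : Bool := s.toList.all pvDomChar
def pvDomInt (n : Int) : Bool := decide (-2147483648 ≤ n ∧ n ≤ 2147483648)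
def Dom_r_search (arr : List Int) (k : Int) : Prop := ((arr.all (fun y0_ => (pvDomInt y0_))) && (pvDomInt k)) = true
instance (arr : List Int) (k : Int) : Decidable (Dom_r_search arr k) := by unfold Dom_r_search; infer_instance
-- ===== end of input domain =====

-- B replaces A's index-bound while loop with divide-and-conquer recursion on list slices (alternative decomposition, same values).

-- ===== PORT A =====
-- the while loop over (la, r); indices stay in range on every Pre_ input, so getD's default is never used
def rsLoopA (arr : List Int) (k : Int) (la r : Nat) : Int :=
  if r - la > 1 then
    let d := (la + r) / 2
    let t := arr.getD d 0
    if t > k then rsLoopA arr k la d else rsLoopA arr k d r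
  else arr.getD la 0
termination_by r - la
decreasing_by all_goals omega

def r_search (arr : List Int) (k : Int) : Int := rsLoopA arr k 0 arr.length

-- ===== PORT B =====
-- recursion on the sublist itself; arr[0] and arr[len//2] are in range on every Pre_ input
def r_search_alt (arr : List Int) (k : Int) : Int :=
  if arr.length ≤ 1 then arr.getD 0 0
  else if arr.getD (arr.length / 2) 0 > k then
    r_search_alt (arr.take (arr.length / 2)) k
  else
    r_search_alt (arr.drop (arr.length / 2)) k
termination_by arr.length
decreasing_by all_goals simp [List.length_take, List.length_drop]; omega

-- ===== PRECONDITION & SPEC =====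
-- Pre_ excludes only the empty list, on which Python A raises IndexError (and B does too).
def Pre_r_search (arr : List Int) (k : Int) : Prop := arr ≠ []
instance (arr : List Int) (k : Int) : Decidable (Pre_r_search arr k) := by unfold Pre_r_search; infer_instance
def pvWitness_r_search : List Int × Int := ([1, 3, 5], 4)

def Spec_r_search (arr : List Int) (k : Int) (out : Int) : Prop := out = r_search_alt arr k
instance (arr : List Int) (k : Int) (out : Int) : Decidable (Spec_r_search arr k out) := by unfold Spec_r_search; infer_instance

-- ===== CLAIM (what is proved, stated in full; the proofs are below) =====
def Claim_equal_r_search : Prop := ∀ (arr : List Int) (k : Int), Dom_r_search arr k → Pre_r_search arr k → Spec_r_search arr k (r_search arr k)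

-- ===== LEMMAS AND PROOFS =====

lemma rsLoopA_eq_alt (arr : List Int) (k : Int) :
    ∀ n la r, r - la = n → la < r → r ≤ arr.length →
      rsLoopA arr k la r = r_search_alt ((arr.drop la).take (r - la)) k := by
  intro n
  induction n using Nat.strong_induction_on with
  | _ n ih =>
    intro la r hn hlt hle
    rw [rsLoopA, r_search_alt]
    have hlen : ((arr.drop la).take (r - la)).length = r - la := by
      simp [List.length_take, List.length_drop]; omega
    by_cases hgap : r - la > 1
    · have hget : ((arr.drop la).take (r - la)).getD (((arr.drop la).take (r - la)).length / 2) 0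
          = arr.getD ((la + r) / 2) 0 := by
        rw [hlen]
        simp only [List.getD, List.getElem?_take_of_lt (by omega : (r - la) / 2 < r - la),
          List.getElem?_drop]
        congr 2
        omega
      rw [if_pos hgap, if_neg (by omega : ¬ ((arr.drop la).take (r - la)).length ≤ 1), hget]
      set d := (la + r) / 2 with hd
      by_cases ht : arr.getD d 0 > k
      · rw [if_pos ht, if_pos ht]
        have h2 : ((arr.drop la).take (r - la)).take (((arr.drop la).take (r - la)).length / 2)
            = (arr.drop la).take (d - la) := by
          rw [hlen, List.take_take]
          congr 1
          omega
        rw [h2]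
        exact ih (d - la) (by omega) la d rfl (by omega) (by omega)
      · rw [if_neg ht, if_neg ht]
        have h2 : ((arr.drop la).take (r - la)).drop (((arr.drop la).take (r - la)).length / 2)
            = (arr.drop d).take (r - d) := by
          rw [hlen, List.drop_take, List.drop_drop]
          congr 1
          · omega
          · congr 1; omega
        rw [h2]
        exact ih (r - d) (by omega) d r rfl (by omega) (by omega)
    · rw [if_neg hgap, if_pos (by omega : ((arr.drop la).take (r - la)).length ≤ 1)]
      have hone : r - la = 1 := by omega
      simp only [List.getD, hone, List.getElem?_take_of_lt (by omega : 0 < 1),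
        List.getElem?_drop, Nat.add_zero]

-- ===== VERDICT (by name: the statement is the Claim_ definition above) =====
theorem r_search_spec : Claim_equal_r_search := by
  intro arr k _ hpre
  unfold Spec_r_search r_search
  have h := rsLoopA_eq_alt arr k arr.length 0 arr.length rfl
    (by cases arr with | nil => exact absurd rfl hpre | cons a t => simp) le_rfl
  simpa using h
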